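-- pv_equiv track=rewrite | github.com/Jus3phgranadoslopez/7ejercicios | ejercicio7( TarjetaCredito).py | validar_tarjeta
-- ===== SOURCE A (Python) =====
-- def validar_tarjeta(numero):
--     """
--     Método estático para validar un número de tarjeta de crédito
--     utilizando el algoritmo de Luhn.
--
--     Args:
--         numero (str): El número de la tarjeta de crédito como una cadena.
--
--     Returns:
--         bool: True si el número de tarjeta es válido según el algoritmo de Luhn,
--               False en caso contrario.
--     """
--     numero = numero.replace(" ", "")  # Eliminar espacios
--     if not numero.isdigit():
--         return False
--
--     n = len(numero)
--     suma = 0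
--     alternar = False
--
--     for i in range(n - 1, -1, -1):
--         digito = int(numero[i])
--         if alternar:
--             digito *= 2
--             if digito > 9:
--                 digito -= 9
--         suma += digito
--         alternar = not alternar
--
--     return (suma % 10 == 0)
-- ===== SOURCE B (Python) =====
-- _TABLA = (0, 2, 4, 6, 8, 1, 3, 5, 7, 9)  # digit-sum of the doubled digit
--
-- def validar_tarjeta(numero):
--     numero = numero.replace(" ", "")
--     if not numero.isdigit():
--         return False
--     total = 0
--     while numero:
--         total += int(numero[-1])
--         if len(numero) > 1:
--             total += _TABLA[int(numero[-2])]
--         numero = numero[:-2]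
--     return total % 10 == 0
-- ===== Notes on version B (the rewrite author's own statement) =====
-- stated objective: alternative
-- what changed: Replaces A's rightmost-to-left single-digit loop with an alternation flag and a doubled-then-subtract-9 branch by a pairwise loop that consumes two digits per iteration from the end of a shrinking string, reading the doubled digit's digit-sum from a precomputed 10-entry table, so no parity state and no doubling arithmetic remain.
import Mathlib
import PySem

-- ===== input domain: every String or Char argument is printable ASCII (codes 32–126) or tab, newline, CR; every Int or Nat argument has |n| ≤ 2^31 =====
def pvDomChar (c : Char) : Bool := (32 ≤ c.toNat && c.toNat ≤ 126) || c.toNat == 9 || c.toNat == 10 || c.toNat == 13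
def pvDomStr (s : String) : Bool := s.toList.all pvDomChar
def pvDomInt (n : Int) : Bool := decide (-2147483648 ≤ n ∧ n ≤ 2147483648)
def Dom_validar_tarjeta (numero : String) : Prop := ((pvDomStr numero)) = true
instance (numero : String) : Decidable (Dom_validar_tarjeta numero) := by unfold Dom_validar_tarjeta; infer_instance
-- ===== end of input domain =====

-- B replaces A's alternation-flag single-digit loop by a pairwise loop consuming two
-- digits per step from the end of a shrinking string, with a precomputed table for the
-- doubled digit's digit-sum; objective: alternative (same checksum, no parity state).


-- ===== PORT A =====
def validar_tarjeta (numero : String) : Bool :=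
  let cs := PySem.Chars.replace numero.toList [' '] []      -- numero.replace(" ", "")
  if !(PySem.Chars.strIsdigit cs) then false                -- if not numero.isdigit(): return False
  else
    let n : Int := PySem.Chars.len cs
    let r := (PySem.List.pyRange (n - 1) (-1) (-1)).foldl
      (fun (st : Int × Bool) i =>
        -- int(numero[i]): exact, since the isdigit guard ensures an ASCII digit char here
        let digito : Int := ((PySem.List.pyGetD cs i '0').toNat : Int) - 48
        let digito := if st.2 then
            (let d := digito * 2; if d > 9 then d - 9 else d)
          else digito
        (st.1 + digito, !st.2)) (0, false)
    decide (PySem.Int.mod r.1 10 = 0)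

-- ===== PORT B =====
-- _TABLA = (0, 2, 4, 6, 8, 1, 3, 5, 7, 9)
def tablaB : List Int := [0, 2, 4, 6, 8, 1, 3, 5, 7, 9]

-- the 'while numero:' loop: two digits consumed per step, numero = numero[:-2]
def luhnPairSum (s : List Char) : Int :=
  if h : s = [] then 0
  else
    -- int(numero[-1]); the isdigit guard at the call site ensures a digit char
    let d1 : Int := ((PySem.List.pyGetD s (-1) '0').toNat : Int) - 48
    -- if len(numero) > 1: total += _TABLA[int(numero[-2])]
    let extra : Int :=
      if (1 : Int) < PySem.Chars.len s then
        PySem.List.pyGetD tablaB (((PySem.List.pyGetD s (-2) '0').toNat : Int) - 48) 0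
      else 0
    d1 + extra + luhnPairSum (PySem.List.slice s none (some (-2)))
termination_by s.length
decreasing_by
  have hsl : PySem.List.slice s none (some (-2)) = s.take (s.length - 2) :=
    PySem.List.slice_to_neg_ofNat s 2 (by omega)
  have hne : 0 < s.length := List.length_pos_iff.mpr h
  simp [hsl]
  omega

def validar_tarjeta_alt (numero : String) : Bool :=
  let cs := PySem.Chars.replace numero.toList [' '] []      -- numero.replace(" ", "")
  if !(PySem.Chars.strIsdigit cs) then false                -- if not numero.isdigit(): return False
  else
    decide (PySem.Int.mod (luhnPairSum cs) 10 = 0)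

-- ===== PRECONDITION & SPEC =====
def Spec_validar_tarjeta (numero : String) (out : Bool) : Prop := out = validar_tarjeta_alt numero
instance (numero : String) (out : Bool) : Decidable (Spec_validar_tarjeta numero out) := by unfold Spec_validar_tarjeta; infer_instance

-- ===== CLAIM (what is proved, stated in full; the proofs are below) =====
def Claim_equal_validar_tarjeta : Prop := ∀ (numero : String), Dom_validar_tarjeta numero → Spec_validar_tarjeta numero (validar_tarjeta numero)

-- ===== LEMMAS AND PROOFS =====

-- reference sum over the REVERSED digit chars, two at a time (proof-only helper)
def gsum : List Char → Int
  | [] => 0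
  | [a] => ((a.toNat : Int) - 48)
  | a :: b :: t =>
      ((a.toNat : Int) - 48)
      + (let d := (((b.toNat : Int) - 48)) * 2; if d > 9 then d - 9 else d)
      + gsum t

-- the table holds the doubled-digit digit-sum
theorem tabla_eq (b : Char) (hb : 48 ≤ b.toNat) (hb' : b.toNat ≤ 57) :
    PySem.List.pyGetD tablaB (((b.toNat : Int) - 48)) 0
    = (let d := (((b.toNat : Int) - 48)) * 2; if d > 9 then d - 9 else d) := by
  set n := b.toNat with hn
  interval_cases n <;> decide

-- A's flag-toggling fold over the reversed digit chars equals gsum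
theorem fold_eq_gsum (l : List Char) (s : Int) :
    (l.foldl (fun (st : Int × Bool) c =>
        (st.1 + (if st.2 then
            (let d := ((c.toNat : Int) - 48) * 2; if d > 9 then d - 9 else d)
          else ((c.toNat : Int) - 48)), !st.2)) (s, false)).1
    = s + gsum l := by
  induction l using gsum.induct generalizing s with
  | case1 => simp [gsum]
  | case2 a => simp [gsum]
  | case3 a b t ih =>
      rw [List.foldl_cons, List.foldl_cons]
      have h := ih ((s + ((a.toNat : Int) - 48))
        + (let d := ((b.toNat : Int) - 48) * 2; if d > 9 then d - 9 else d))
      refine h.trans ?_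
      simp only [gsum]
      ring

-- B's pairwise loop over s equals gsum of the reversed chars
theorem luhnPairSum_eq_gsum (r : List Char)
    (hd : ∀ c ∈ r, PySem.Chars.isdigit c = true) :
    luhnPairSum r.reverse = gsum r := by
  induction r using gsum.induct with
  | case1 => simp [luhnPairSum, gsum]
  | case2 a =>
      rw [show ([a] : List Char).reverse = [a] from rfl, luhnPairSum,
        dif_neg (by simp : ([a] : List Char) ≠ [])]
      have h1 : PySem.List.pyGetD [a] (-1) '0' = a :=
        PySem.List.pyGetD_neg_one_append_singleton ([] : List Char) a '0'
      have h3 : PySem.List.slice [a] none (some (-2)) = ([] : List Char) := by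
        rw [PySem.List.slice_to_neg_ofNat _ 2 (by omega)]; simp
      have hlt : ¬ ((1 : Int) < PySem.Chars.len ([a] : List Char)) := by
        rw [PySem.Chars.len_eq]; simp
      simp only [h1, h3, if_neg hlt, gsum]
      rw [luhnPairSum]
      simp
  | case3 a b t ih =>
      have hrev : (a :: b :: t).reverse = (t.reverse ++ [b]) ++ [a] := by simp
      have hlen : ((a :: b :: t).reverse).length = t.length + 2 := by simp
      rw [luhnPairSum, dif_neg (by simp : (a :: b :: t).reverse ≠ [])]
      have h1 : PySem.List.pyGetD ((a :: b :: t).reverse) (-1) '0' = a := by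
        rw [hrev]; exact PySem.List.pyGetD_neg_one_append_singleton _ _ _
      have h2 : PySem.List.pyGetD ((a :: b :: t).reverse) (-2) '0' = b := by
        rw [PySem.List.pyGetD_neg_ofNat _ 2 _ (by omega) (by simp)]
        rw [List.getElem_reverse]
        simp
      have h3 : PySem.List.slice ((a :: b :: t).reverse) none (some (-2)) = t.reverse := by
        rw [PySem.List.slice_to_neg_ofNat _ 2 (by omega), hlen]
        rw [hrev]
        simp
      have hlt : (1 : Int) < PySem.Chars.len ((a :: b :: t).reverse) := by
        rw [PySem.Chars.len_eq, hlen]; push_cast; omega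
      have hb := hd b (by simp)
      have hble : 48 ≤ b.toNat ∧ b.toNat ≤ 57 := by
        simp [PySem.Chars.isdigit, Char.le_def] at hb
        exact ⟨hb.1, hb.2⟩
      simp only [h1, h2, h3, if_pos hlt]
      rw [ih (fun c hc => hd c (by simp [hc])), tabla_eq b hble.1 hble.2]
      simp only [gsum]

theorem validar_tarjeta_eq (numero : String) :
    validar_tarjeta numero = validar_tarjeta_alt numero := by
  unfold validar_tarjeta validar_tarjeta_alt
  set cs := PySem.Chars.replace numero.toList [' '] []
  by_cases hg : PySem.Chars.strIsdigit cs = true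
  · have hall : ∀ c ∈ cs.reverse, PySem.Chars.isdigit c = true := by
      intro c hc
      have hg' := hg
      simp [PySem.Chars.strIsdigit] at hg'
      exact hg'.2 c (List.mem_reverse.mp hc)
    simp only [hg, Bool.not_true, Bool.false_eq_true, if_false]
    -- rewrite A's countdown index loop as a fold over cs.reverse
    have hrange : PySem.List.pyRange ((PySem.Chars.len cs) - 1) (-1) (-1)
        = (PySem.List.pyRange 0 (cs.length : Int) 1).reverse := by
      rw [PySem.List.pyRange_neg_one_eq_reverse]
      simp [PySem.Chars.len_eq]
    rw [hrange]
    have hmap : (PySem.List.pyRange 0 (cs.length : Int) 1).reverse.map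
          (fun i => PySem.List.pyGetD cs i '0') = cs.reverse := by
      rw [List.map_reverse, PySem.List.map_pyGetD_pyRange_zero']
    have hfold :
        ((PySem.List.pyRange 0 (cs.length : Int) 1).reverse.foldl
          (fun (st : Int × Bool) i =>
            (st.1 + (if st.2 then
                (let d := (((PySem.List.pyGetD cs i '0').toNat : Int) - 48) * 2;
                  if d > 9 then d - 9 else d)
              else (((PySem.List.pyGetD cs i '0').toNat : Int) - 48)), !st.2)) (0, false))
        = (cs.reverse.foldl (fun (st : Int × Bool) c =>
            (st.1 + (if st.2 then
                (let d := ((c.toNat : Int) - 48) * 2; if d > 9 then d - 9 else d)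
              else ((c.toNat : Int) - 48)), !st.2)) (0, false)) := by
      rw [← hmap, List.foldl_map]
    rw [hfold, fold_eq_gsum cs.reverse 0]
    have hB : luhnPairSum cs = gsum cs.reverse := by
      have := luhnPairSum_eq_gsum cs.reverse hall
      rwa [List.reverse_reverse] at this
    rw [hB]
    simp
  · rw [Bool.not_eq_true] at hg
    simp [hg]

-- ===== VERDICT (by name: the statement is the Claim_ definition above) =====
theorem validar_tarjeta_spec : Claim_equal_validar_tarjeta := by
  intro numero _
  unfold Spec_validar_tarjeta
  exact validar_tarjeta_eq numero
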